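-- pv_equiv track=rewrite | github.com/kadalu/binnacle | binnacle/testutils.py | command_groups
-- ===== SOURCE A (Python) =====
-- from typing import List, Tuple
--
-- PIPEARG = "--pipe"
--
-- def command_groups(args: List[str]) -> List[List[str]]:
--     """
--     Split and Group the commands based on `--pipe` argument
--     """
--     groups:List[List[str]] = []
--     for arg in args:
--         if len(groups) == 0:
--             groups.append([])
--
--         if arg == PIPEARG:
--             groups.append([])
--             continue
--
--         groups[-1].append(arg)
--
--     return groups
-- ===== SOURCE B (Python) =====
-- from typing import List
--
-- PIPEARG = "--pipe"
--
-- def command_groups(args: List[str]) -> List[List[str]]: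
--     """
--     Split and Group the commands based on `--pipe` argument
--     """
--     if not args:
--         return []
--     idxs = [i for i, a in enumerate(args) if a == PIPEARG]
--     groups: List[List[str]] = []
--     start = 0
--     for i in idxs:
--         groups.append(args[start:i])
--         start = i + 1
--     groups.append(args[start:])
--     return groups
-- ===== Notes on version B (the rewrite author's own statement) =====
-- stated objective: alternative
-- what changed: Instead of A's single pass that appends each arg to the last group, B first collects the positions of the '--pipe' delimiters and then emits the groups as slices between consecutive delimiter positions.
import Mathlib
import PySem

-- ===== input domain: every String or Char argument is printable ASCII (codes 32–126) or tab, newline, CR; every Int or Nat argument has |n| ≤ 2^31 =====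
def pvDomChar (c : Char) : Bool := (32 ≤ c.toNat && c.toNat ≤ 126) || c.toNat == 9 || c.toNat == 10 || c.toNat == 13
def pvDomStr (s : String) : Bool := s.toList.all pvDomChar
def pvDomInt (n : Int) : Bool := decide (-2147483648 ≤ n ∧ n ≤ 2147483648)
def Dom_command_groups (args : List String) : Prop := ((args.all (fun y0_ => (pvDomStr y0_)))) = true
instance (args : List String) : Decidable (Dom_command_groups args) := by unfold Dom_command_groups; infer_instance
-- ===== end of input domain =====

-- B groups the args by slicing between the collected '--pipe' positions instead of A's
-- append-to-last-group accumulation; same O(n) cost, different decomposition.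

-- ===== PORT A =====
-- groups[-1].append(arg): append arg to the last group (A never reaches the [] case)
def pvAppendLast : List (List String) → String → List (List String)
  | [], _ => []
  | [g], a => [g ++ [a]]
  | g :: gs, a => g :: pvAppendLast gs a

-- body of A's for-loop over one arg
def pvCgStep (groups : List (List String)) (arg : String) : List (List String) :=
  let groups := if groups.length == 0 then groups ++ [[]] else groups
  if arg = "--pipe" then groups ++ [[]]
  else pvAppendLast groups arg

def command_groups (args : List String) : List (List String) :=
  args.foldl pvCgStep []

-- ===== PORT B =====
-- B's for-loop over the delimiter positions: each iteration emits args[start:i] and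
-- advances start to i+1; the trailing args[start:] is the base case.
def pvChop (args : List String) : List Int → Int → List (List String)
  | [], start => [PySem.List.slice args (some start) none]
  | i :: rest, start => PySem.List.slice args (some start) (some i) :: pvChop args rest (i + 1)

def command_groups_alt (args : List String) : List (List String) :=
  if args = [] then []
  else
    let idxs := ((PySem.List.enumerate args 0).filter (fun p => p.2 = "--pipe")).map (·.1)
    pvChop args idxs 0

-- ===== PRECONDITION & SPEC =====
def Spec_command_groups (args : List String) (out : List (List String)) : Prop := out = command_groups_alt args
instance (args : List String) (out : List (List String)) : Decidable (Spec_command_groups args out) := by unfold Spec_command_groups; infer_instance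

-- ===== CLAIM (what is proved, stated in full; the proofs are below) =====
def Claim_equal_command_groups : Prop := ∀ (args : List String), Dom_command_groups args → Spec_command_groups args (command_groups args)

-- ===== LEMMAS AND PROOFS =====

-- reference splitter both ports are reduced to
def pvGlue (g : List String) : List (List String) → List (List String)
  | [] => [g]
  | h :: t => (g ++ h) :: t

def pvSp : List String → List (List String)
  | [] => [[]]
  | a :: rest => if a = "--pipe" then [] :: pvSp rest else pvGlue [a] (pvSp rest)

-- the collected delimiter positions, as naturals
def pvPipeIdx : List String → List Nat
  | [] => []
  | a :: rest =>
    if a = "--pipe" then 0 :: (pvPipeIdx rest).map (· + 1)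
    else (pvPipeIdx rest).map (· + 1)

def pvCasts (l : List Nat) : List Int := l.map (fun n : Nat => (n : Int))

theorem pvCasts_nil : pvCasts [] = [] := rfl
theorem pvCasts_cons (n : Nat) (t : List Nat) : pvCasts (n :: t) = (n : Int) :: pvCasts t := rfl

theorem pvSp_ne_nil (args : List String) : pvSp args ≠ [] := by
  cases args with
  | nil => simp [pvSp]
  | cons a rest =>
    simp only [pvSp]
    split
    · simp
    · cases h : pvSp rest <;> simp [pvGlue]

theorem pvGlue_nil (xs : List (List String)) (h : xs ≠ []) : pvGlue [] xs = xs := by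
  cases xs with
  | nil => exact absurd rfl h
  | cons a t => simp [pvGlue]

theorem pvGlue_glue (g a : List String) (xs : List (List String)) :
    pvGlue g (pvGlue a xs) = pvGlue (g ++ a) xs := by
  cases xs <;> simp [pvGlue]

theorem pvAppendLast_snoc (gs : List (List String)) (g : List String) (a : String) :
    pvAppendLast (gs ++ [g]) a = gs ++ [g ++ [a]] := by
  induction gs with
  | nil => rfl
  | cons h t ih =>
    cases t with
    | nil => simp [pvAppendLast]
    | cons h' t' => simpa [pvAppendLast] using ih

-- A's loop invariant: folding over args from a nonempty state gs ++ [g]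
theorem pvFoldA (args : List String) : ∀ (gs : List (List String)) (g : List String),
    List.foldl pvCgStep (gs ++ [g]) args = gs ++ pvGlue g (pvSp args) := by
  induction args with
  | nil => intro gs g; simp [pvSp, pvGlue]
  | cons a rest ih =>
    intro gs g
    by_cases ha : a = "--pipe"
    · have h1 : pvCgStep (gs ++ [g]) a = (gs ++ [g]) ++ [[]] := by
        simp [pvCgStep, ha]
      rw [List.foldl_cons, h1, ih (gs ++ [g]) []]
      rw [pvGlue_nil _ (pvSp_ne_nil rest)]
      simp [pvSp, ha, pvGlue]
    · have h1 : pvCgStep (gs ++ [g]) a = gs ++ [g ++ [a]] := by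
        simp [pvCgStep, ha, pvAppendLast_snoc]
      rw [List.foldl_cons, h1, ih gs (g ++ [a])]
      simp [pvSp, ha, pvGlue_glue]

-- the list comprehension over enumerate collects exactly the pipe positions
theorem pvEnumFilter (args : List String) : ∀ (s : Int),
    ((PySem.List.enumerate args s).filter (fun p => p.2 = "--pipe")).map (·.1)
      = (pvPipeIdx args).map (fun n : Nat => s + (n : Int)) := by
  induction args with
  | nil => intro s; simp [PySem.List.enumerate_nil, pvPipeIdx]
  | cons a rest ih =>
    intro s
    rw [PySem.List.enumerate_cons]
    by_cases ha : a = "--pipe"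
    · rw [List.filter_cons_of_pos (by simp [ha])]
      rw [show pvPipeIdx (a :: rest) = 0 :: (pvPipeIdx rest).map (· + 1) by simp [pvPipeIdx, ha]]
      simp only [List.map_cons, List.map_map, ih (s + 1)]
      congr 1
      · simp
      · refine List.map_congr_left (fun n _ => ?_)
        simp [Function.comp]; ring
    · rw [List.filter_cons_of_neg (by simp [ha])]
      rw [show pvPipeIdx (a :: rest) = (pvPipeIdx rest).map (· + 1) by simp [pvPipeIdx, ha]]
      rw [ih (s + 1), List.map_map]
      refine List.map_congr_left (fun n _ => ?_)
      simp [Function.comp]; ring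

-- shifting: chopping a::rest with all indices and the start shifted by one chops rest
theorem pvChop_shift (a : String) (rest : List String) :
    ∀ (idxs : List Nat) (s : Nat),
    pvChop (a :: rest) (pvCasts (idxs.map (· + 1))) ((s : Int) + 1)
      = pvChop rest (pvCasts idxs) s := by
  intro idxs
  induction idxs with
  | nil =>
    intro s
    simp only [List.map_nil, pvCasts_nil]
    show [PySem.List.slice (a :: rest) (some ((s : Int) + 1)) none]
        = [PySem.List.slice rest (some ((s : Nat) : Int)) none]
    rw [show ((s : Int) + 1) = ((s + 1 : Nat) : Int) by push_cast; ring]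
    rw [PySem.List.slice_from_natCast, PySem.List.slice_from_natCast]
    simp
  | cons i t ih =>
    intro s
    simp only [List.map_cons, pvCasts_cons, pvChop]
    congr 1
    · rw [show ((s : Int) + 1) = ((s + 1 : Nat) : Int) by push_cast; ring,
        PySem.List.slice_natCast, PySem.List.slice_natCast]
      simp [Nat.add_sub_add_right]
    · have h := ih (i + 1)
      push_cast at h ⊢
      exact h

-- prepending a non-delimiter arg conses it onto the first chopped group
theorem pvChop_cons_arg (a : String) (rest : List String) (idxs : List Nat) :
    pvChop (a :: rest) (pvCasts (idxs.map (· + 1))) 0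
      = pvGlue [a] (pvChop rest (pvCasts idxs) 0) := by
  cases idxs with
  | nil =>
    simp only [List.map_nil, pvCasts_nil]
    show [PySem.List.slice (a :: rest) (some 0) none]
        = pvGlue [a] [PySem.List.slice rest (some 0) none]
    rw [show (0 : Int) = ((0 : Nat) : Int) from rfl,
      PySem.List.slice_from_natCast, PySem.List.slice_from_natCast]
    simp [pvGlue]
  | cons i t =>
    simp only [List.map_cons, pvCasts_cons, pvChop, pvGlue]
    congr 1
    · rw [show (0 : Int) = ((0 : Nat) : Int) from rfl,
        PySem.List.slice_natCast, PySem.List.slice_natCast]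
      simp
    · have h := pvChop_shift a rest t (i + 1)
      push_cast at h ⊢
      exact h

-- B's chop over the delimiter positions computes the reference splitter
theorem pvFoldB (args : List String) :
    pvChop args (pvCasts (pvPipeIdx args)) 0 = pvSp args := by
  induction args with
  | nil =>
    show [PySem.List.slice ([] : List String) (some 0) none] = pvSp []
    rw [show (0 : Int) = ((0 : Nat) : Int) from rfl, PySem.List.slice_from_natCast]
    simp [pvSp]
  | cons a rest ih =>
    by_cases ha : a = "--pipe"
    · rw [show pvPipeIdx (a :: rest) = 0 :: (pvPipeIdx rest).map (· + 1) by
        simp [pvPipeIdx, ha]]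
      rw [pvCasts_cons]
      have h := pvChop_shift a rest (pvPipeIdx rest) 0
      rw [Nat.cast_zero, zero_add] at h
      have hhead : PySem.List.slice (a :: rest) (some (0 : Int)) (some (0 : Int)) = [] := by
        rw [show (0 : Int) = ((0 : Nat) : Int) from rfl, PySem.List.slice_natCast]
        simp
      simp only [pvChop, Nat.cast_zero, zero_add, hhead, h, ih]
      simp [pvSp, ha]
    · rw [show pvPipeIdx (a :: rest) = (pvPipeIdx rest).map (· + 1) by simp [pvPipeIdx, ha]]
      rw [pvChop_cons_arg a rest (pvPipeIdx rest), ih]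
      simp [pvSp, ha]

-- ===== VERDICT (by name: the statement is the Claim_ definition above) =====
theorem command_groups_spec : Claim_equal_command_groups := by
  intro args _
  unfold Spec_command_groups command_groups command_groups_alt
  cases args with
  | nil => simp
  | cons a rest =>
    have hstep : pvCgStep [] a = pvCgStep [[]] a := by simp [pvCgStep]
    rw [List.foldl_cons, hstep, ← List.foldl_cons]
    have hA := pvFoldA (a :: rest) [] []
    simp only [List.nil_append] at hA
    rw [hA, pvGlue_nil _ (pvSp_ne_nil (a :: rest))]
    rw [if_neg (by simp), pvEnumFilter (a :: rest) 0]
    have hc : ((pvPipeIdx (a :: rest)).map (fun n : Nat => (0 : Int) + (n : Int)))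
        = pvCasts (pvPipeIdx (a :: rest)) := by simp [pvCasts]
    rw [hc, pvFoldB (a :: rest)]
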